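-- pv_equiv track=rewrite | github.com/Procrat/typy | examples/davit/reeks_09/Chemische_woorden.py | chemischWoord
-- ===== SOURCE A (Python) =====
-- def langstePrefix(woord,prefixen):
--     returnwaarde = ""
--     lowerWoord = woord.lower()
--     for prefix in prefixen:
--         if lowerWoord.startswith(prefix.lower()):
--             if(len(prefix) > len(returnwaarde)):
--                 returnwaarde = prefix
--     return returnwaarde
--
-- def chemischWoord(woord,prefixen):
--     returnvalue = langstePrefix(woord, prefixen)
--     if(returnvalue is ""):
--         return ""
--     woord = woord[len(returnvalue):]
--     while(woord is not ""):
--         prefix = langstePrefix(woord, prefixen)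
--         if(prefix  is ""):
--             return ""
--         returnvalue = returnvalue + "-" + prefix
--         woord = woord[len(prefix):]
--     return returnvalue
-- ===== SOURCE B (Python) =====
-- def chemischWoord(woord, prefixen):
--     # Longest-match greedy via a hash table keyed by lowercased prefix
--     # plus the distinct candidate lengths tried longest-first.
--     table = {}
--     for p in prefixen:
--         table.setdefault(p.lower(), p)
--     lengths = sorted({len(p) for p in prefixen if p}, reverse=True)
--     rest = woord.lower()
--     parts = []
--     while rest:
--         for L in lengths:
--             if L <= len(rest) and rest[:L] in table:
--                 parts.append(table[rest[:L]])
--                 rest = rest[L:]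
--                 break
--         else:
--             return ""
--     return "-".join(parts)
-- ===== Notes on version B (the rewrite author's own statement) =====
-- stated objective: faster
-- what changed: A rescans the whole prefix list at every consumed chunk (lowercasing each prefix again) to find the longest match; B precomputes once a dict keyed by lowercased prefix plus the distinct prefix lengths sorted descending, then at each position just probes the table with slices of the pre-lowercased word, longest length first.
import Mathlib
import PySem

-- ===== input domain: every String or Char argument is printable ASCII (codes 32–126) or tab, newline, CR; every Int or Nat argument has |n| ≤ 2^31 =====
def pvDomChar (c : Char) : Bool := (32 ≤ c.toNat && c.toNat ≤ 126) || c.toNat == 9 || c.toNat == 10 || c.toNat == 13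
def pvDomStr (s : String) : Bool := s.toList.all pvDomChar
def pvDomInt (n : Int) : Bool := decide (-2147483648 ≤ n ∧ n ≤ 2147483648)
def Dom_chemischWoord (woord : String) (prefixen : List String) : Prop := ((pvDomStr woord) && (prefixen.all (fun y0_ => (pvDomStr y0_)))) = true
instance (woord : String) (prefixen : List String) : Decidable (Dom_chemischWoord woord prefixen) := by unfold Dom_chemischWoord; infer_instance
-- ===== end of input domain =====

-- B replaces A's per-step scan of all prefixes with a hash table keyed by lowercased
-- prefix plus the distinct candidate lengths tried longest-first (objective: faster).
-- A's `is ""` comparisons on CPython-interned strings behave as equality here.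

-- ===== PORT A =====
def langstePrefix (woord : String) (prefixen : List String) : String :=
  let lowerWoord := PySem.Str.lower woord
  prefixen.foldl (fun returnwaarde pfx =>
    if PySem.Str.startswith lowerWoord (PySem.Str.lower pfx) then
      if PySem.Str.len returnwaarde < PySem.Str.len pfx then pfx else returnwaarde
    else returnwaarde) ""

def chemischLoop (prefixen : List String) (woord : String) (returnvalue : String) : String :=
  if woord = "" then returnvalue
  else
    let pfx := langstePrefix woord prefixen
    if h : pfx = "" then ""
    else chemischLoop prefixen (PySem.Str.slice woord (some (PySem.Str.len pfx)) none)
           (returnvalue ++ "-" ++ pfx)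
termination_by woord.toList.length
decreasing_by
  simp only [PySem.Str.toList_slice, PySem.Chars.slice_eq_listSlice, PySem.Str.len_eq]
  rw [PySem.List.slice_from _ (by positivity)]
  have h1 : (langstePrefix woord prefixen).toList.length ≠ 0 := by
    simp only [ne_eq, List.length_eq_zero_iff, String.toList_eq_nil_iff]; exact h
  have h2 : woord.toList.length ≠ 0 := by
    simp only [ne_eq, List.length_eq_zero_iff, String.toList_eq_nil_iff]; assumption
  simp only [List.length_drop, Int.toNat_natCast]
  omega

def chemischWoord (woord : String) (prefixen : List String) : String :=
  let returnvalue := langstePrefix woord prefixen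
  if returnvalue = "" then ""
  else chemischLoop prefixen (PySem.Str.slice woord (some (PySem.Str.len returnvalue)) none) returnvalue

-- ===== PORT B =====
-- the for-loop over `lengths` with its break: first L with L ≤ len(rest) and rest[:L] in table
def altFind (table : PySem.Dict String String) (rest : String) : List Int → Option (String × Int)
  | [] => none
  | L :: ls =>
      if L ≤ PySem.Str.len rest ∧ table.contains (PySem.Str.slice rest none (some L)) then
        some (table.getD (PySem.Str.slice rest none (some L)) "", L)
      else altFind table rest ls

-- the while-loop; fuel-driven (fuel bounds the number of iterations)
def altLoop (table : PySem.Dict String String) (lengths : List Int) :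
    Nat → String → List String → String
  | 0, _, _ => ""
  | fuel + 1, rest, parts =>
      if rest = "" then PySem.Str.join "-" parts
      else
        match altFind table rest lengths with
        | none => ""
        | some (orig, L) =>
            altLoop table lengths fuel (PySem.Str.slice rest (some L) none) (parts ++ [orig])

def chemischWoord_alt (woord : String) (prefixen : List String) : String :=
  let table := prefixen.foldl (fun d p => d.setdefault (PySem.Str.lower p) p) PySem.Dict.empty
  let lengths := PySem.List.sorted
    (PySem.Set.ofList ((prefixen.filter (fun p => ¬ p = "")).map PySem.Str.len)) (fun x => x) true
  altLoop table lengths (woord.toList.length + 1) (PySem.Str.lower woord) []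

-- ===== PRECONDITION & SPEC =====
def Spec_chemischWoord (woord : String) (prefixen : List String) (out : String) : Prop := out = chemischWoord_alt woord prefixen
instance (woord : String) (prefixen : List String) (out : String) : Decidable (Spec_chemischWoord woord prefixen out) := by unfold Spec_chemischWoord; infer_instance

-- ===== CLAIM (what is proved, stated in full; the proofs are below) =====
def Claim_equal_chemischWoord : Prop := ∀ (woord : String) (prefixen : List String), Dom_chemischWoord woord prefixen → Spec_chemischWoord woord prefixen (chemischWoord woord prefixen)

-- ===== LEMMAS AND PROOFS =====

-- proof-side names for B's precomputed structures (same expressions as in chemischWoord_alt)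
def tbl (P : List String) : PySem.Dict String String :=
  P.foldl (fun d p => d.setdefault (PySem.Str.lower p) p) PySem.Dict.empty

def lens (P : List String) : List Int :=
  PySem.List.sorted (PySem.Set.ofList ((P.filter (fun p => ¬ p = "")).map PySem.Str.len)) (fun x => x) true

def goodb (lw : String) (p : String) : Bool := PySem.Str.startswith lw (PySem.Str.lower p)

def maxLen (lw : String) (P : List String) : Int :=
  ((P.filter (goodb lw)).map PySem.Str.len).foldr max 0

-- generic list helpers
theorem pvFind?_congr {α : Type} (l : List α) (p q : α → Bool) (h : ∀ x ∈ l, p x = q x) :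
    l.find? p = l.find? q := by
  induction l with
  | nil => rfl
  | cons a l ih =>
    simp only [List.find?_cons]
    rw [h a (by simp)]
    cases q a with
    | true => rfl
    | false => exact ih (fun x hx => h x (by simp [hx]))

theorem pvFind?_max (l : List Int) (q : Int → Bool) (L : Int)
    (hp : l.Pairwise (fun a b => b ≤ a)) (h : l.find? q = some L) :
    ∀ L' ∈ l, q L' = true → L' ≤ L := by
  induction l with
  | nil => simp at h
  | cons a l ih =>
    rw [List.find?_cons] at h
    rcases List.pairwise_cons.mp hp with ⟨ha, hl⟩
    cases hqa : q a with
    | true =>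
      rw [hqa] at h
      injection h with h; subst h
      intro L' hL' _
      rcases List.mem_cons.mp hL' with rfl | hL'
      · exact le_refl _
      · exact ha _ hL'
    | false =>
      rw [hqa] at h
      intro L' hL' hq
      rcases List.mem_cons.mp hL' with rfl | hL'
      · rw [hqa] at hq; exact absurd hq (by simp)
      · exact ih hl h L' hL' hq

theorem pvLe_foldrMax (l : List Int) (x : Int) (hx : x ∈ l) : x ≤ l.foldr max 0 := by
  induction l with
  | nil => simp at hx
  | cons a l ih =>
    simp only [List.foldr_cons]
    rcases List.mem_cons.mp hx with rfl | hx
    · exact le_max_left _ _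
    · exact le_trans (ih hx) (le_max_right _ _)

theorem pvFoldrMax_mem (l : List Int) (h : 0 < l.foldr max 0) : l.foldr max 0 ∈ l := by
  induction l with
  | nil => simp at h
  | cons a l ih =>
    simp only [List.foldr_cons] at h ⊢
    rcases le_total (l.foldr max 0) a with hle | hle
    · rw [max_eq_left hle]; exact List.mem_cons_self
    · rw [max_eq_right hle] at h ⊢
      right; exact ih h

-- maxLen facts
theorem maxLen_cons (lw p : String) (P : List String) :
    maxLen lw (p :: P) =
      if goodb lw p then max (PySem.Str.len p) (maxLen lw P) else maxLen lw P := by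
  by_cases h : goodb lw p <;> simp [maxLen, h]

theorem le_maxLen (lw : String) (P : List String) (p : String) (hp : p ∈ P)
    (hg : goodb lw p = true) : PySem.Str.len p ≤ maxLen lw P := by
  apply pvLe_foldrMax
  exact List.mem_map_of_mem (List.mem_filter.mpr ⟨hp, hg⟩)

theorem maxLen_attain (lw : String) (P : List String) (h : 0 < maxLen lw P) :
    ∃ p ∈ P, goodb lw p = true ∧ PySem.Str.len p = maxLen lw P := by
  have := pvFoldrMax_mem _ h
  rcases List.mem_map.mp this with ⟨p, hp, hlen⟩
  rcases List.mem_filter.mp hp with ⟨hpP, hg⟩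
  exact ⟨p, hpP, hg, hlen⟩

-- ===== A-side characterization =====
theorem foldl_langste (lw : String) (P : List String) : ∀ (acc : String),
    P.foldl (fun returnwaarde pfx =>
      if PySem.Str.startswith lw (PySem.Str.lower pfx) then
        if PySem.Str.len returnwaarde < PySem.Str.len pfx then pfx else returnwaarde
      else returnwaarde) acc
    = (P.find? (fun p => goodb lw p && decide (PySem.Str.len acc < PySem.Str.len p)
        && decide (maxLen lw P ≤ PySem.Str.len p))).getD acc := by
  induction P with
  | nil => intro acc; rfl
  | cons p P ih =>
    intro acc
    simp only [List.foldl_cons, List.find?_cons]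
    by_cases hg : goodb lw p = true
    · have hg' : PySem.Str.startswith lw (PySem.Str.lower p) = true := hg
      rw [if_pos hg']
      by_cases hlt : PySem.Str.len acc < PySem.Str.len p
      · rw [if_pos hlt]
        by_cases hM : maxLen lw P ≤ PySem.Str.len p
        · have hMc : maxLen lw (p :: P) = PySem.Str.len p := by
            rw [maxLen_cons, if_pos hg]; exact max_eq_left hM
          have hhead : (goodb lw p && decide (PySem.Str.len acc < PySem.Str.len p)
              && decide (maxLen lw (p :: P) ≤ PySem.Str.len p)) = true := by
            rw [hg, decide_eq_true hlt, hMc, decide_eq_true (le_refl _)]; rfl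
          rw [hhead, ih p]
          have hnone : P.find? (fun q => goodb lw q && decide (PySem.Str.len p < PySem.Str.len q)
              && decide (maxLen lw P ≤ PySem.Str.len q)) = none := by
            rw [List.find?_eq_none]
            intro q hq
            by_cases hgq : goodb lw q = true
            · have h1 : PySem.Str.len q ≤ maxLen lw P := le_maxLen lw P q hq hgq
              rw [decide_eq_false (by omega : ¬ (PySem.Str.len p < PySem.Str.len q))]
              simp
            · simp [Bool.eq_false_iff.mpr hgq]
          rw [hnone]
          rfl
        · push_neg at hM
          have hMc : maxLen lw (p :: P) = maxLen lw P := by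
            rw [maxLen_cons, if_pos hg]; exact max_eq_right (le_of_lt hM)
          have hhead : (goodb lw p && decide (PySem.Str.len acc < PySem.Str.len p)
              && decide (maxLen lw (p :: P) ≤ PySem.Str.len p)) = false := by
            rw [hMc, decide_eq_false (by omega : ¬ maxLen lw P ≤ PySem.Str.len p)]
            simp
          rw [hhead, ih p, hMc]
          have hcongr : P.find? (fun q => goodb lw q && decide (PySem.Str.len p < PySem.Str.len q)
                && decide (maxLen lw P ≤ PySem.Str.len q))
              = P.find? (fun q => goodb lw q && decide (PySem.Str.len acc < PySem.Str.len q)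
                && decide (maxLen lw P ≤ PySem.Str.len q)) := by
            apply pvFind?_congr
            intro q _
            by_cases hMq : maxLen lw P ≤ PySem.Str.len q
            · rw [decide_eq_true (by omega : PySem.Str.len p < PySem.Str.len q),
                decide_eq_true (by omega : PySem.Str.len acc < PySem.Str.len q)]
            · rw [decide_eq_false hMq]
              simp
          rw [hcongr]
          have hpos : 0 < maxLen lw P := lt_of_le_of_lt (by simp [PySem.Str.len_eq] : (0:Int) ≤ PySem.Str.len p) hM
          rcases maxLen_attain lw P hpos with ⟨q, hqP, hgq, hlq⟩
          have hsome : (P.find? (fun q => goodb lw q && decide (PySem.Str.len acc < PySem.Str.len q)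
              && decide (maxLen lw P ≤ PySem.Str.len q))).isSome := by
            rw [List.find?_isSome]
            exact ⟨q, hqP, by rw [hgq, decide_eq_true (by omega), decide_eq_true (by omega)]; rfl⟩
          rcases Option.isSome_iff_exists.mp hsome with ⟨v, hv⟩
          rw [hv]
          rfl
      · rw [if_neg hlt]
        have hhead : (goodb lw p && decide (PySem.Str.len acc < PySem.Str.len p)
            && decide (maxLen lw (p :: P) ≤ PySem.Str.len p)) = false := by
          rw [decide_eq_false hlt]; simp
        rw [hhead, ih acc]
        push_neg at hlt
        by_cases hM : PySem.Str.len p ≤ maxLen lw P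
        · have hMc : maxLen lw (p :: P) = maxLen lw P := by
            rw [maxLen_cons, if_pos hg]; exact max_eq_right hM
          rw [hMc]
        · push_neg at hM
          have hMc : maxLen lw (p :: P) = PySem.Str.len p := by
            rw [maxLen_cons, if_pos hg]; exact max_eq_left (le_of_lt hM)
          have h1 : P.find? (fun q => goodb lw q && decide (PySem.Str.len acc < PySem.Str.len q)
              && decide (maxLen lw P ≤ PySem.Str.len q)) = none := by
            rw [List.find?_eq_none]
            intro q hq
            by_cases hgq : goodb lw q = true
            · have := le_maxLen lw P q hq hgq
              rw [decide_eq_false (by omega : ¬ PySem.Str.len acc < PySem.Str.len q)]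
              simp
            · simp [Bool.eq_false_iff.mpr hgq]
          have h2 : P.find? (fun q => goodb lw q && decide (PySem.Str.len acc < PySem.Str.len q)
              && decide (maxLen lw (p :: P) ≤ PySem.Str.len q)) = none := by
            rw [List.find?_eq_none]
            intro q hq
            by_cases hgq : goodb lw q = true
            · have := le_maxLen lw P q hq hgq
              rw [hMc, decide_eq_false (by omega : ¬ PySem.Str.len p ≤ PySem.Str.len q)]
              simp
            · simp [Bool.eq_false_iff.mpr hgq]
          rw [h1, h2]
    · have hg' : ¬ PySem.Str.startswith lw (PySem.Str.lower p) = true := hg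
      rw [if_neg hg']
      have hhead : (goodb lw p && decide (PySem.Str.len acc < PySem.Str.len p)
          && decide (maxLen lw (p :: P) ≤ PySem.Str.len p)) = false := by
        rw [Bool.eq_false_iff.mpr hg]; simp
      rw [hhead, ih acc]
      have hMc : maxLen lw (p :: P) = maxLen lw P := by
        rw [maxLen_cons, if_neg hg]
      rw [hMc]

theorem langste_eq_find? (w : String) (P : List String) :
    langstePrefix w P
    = (P.find? (fun p => goodb (PySem.Str.lower w) p && decide (0 < PySem.Str.len p)
        && decide (maxLen (PySem.Str.lower w) P ≤ PySem.Str.len p))).getD "" := by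
  unfold langstePrefix
  rw [foldl_langste (PySem.Str.lower w) P ""]
  have h0 : PySem.Str.len "" = 0 := by simp [PySem.Str.len_eq]
  simp only [h0]

-- ===== B-side characterizations =====
theorem tbl_get?_gen (P : List String) : ∀ (d : PySem.Dict String String) (k : String),
    (P.foldl (fun d p => d.setdefault (PySem.Str.lower p) p) d).get? k
      = (d.get? k).or (P.find? (fun p => PySem.Str.lower p == k)) := by
  induction P with
  | nil => intro d k; simp
  | cons p P ih =>
    intro d k
    simp only [List.foldl_cons, List.find?_cons]
    rw [ih]
    by_cases hk : PySem.Str.lower p = k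
    · subst hk
      simp only [beq_self_eq_true]
      rw [PySem.Dict.get?_setdefault_self]
      cases hd : d.get? (PySem.Str.lower p) <;> simp
    · have hb : (PySem.Str.lower p == k) = false := by simp [hk]
      rw [hb, PySem.Dict.get?_setdefault_of_ne d p (fun h => hk h.symm)]

theorem tbl_get? (P : List String) (k : String) :
    (tbl P).get? k = P.find? (fun p => PySem.Str.lower p == k) := by
  unfold tbl
  rw [tbl_get?_gen]
  simp

theorem mem_lens (P : List String) (L : Int) :
    L ∈ lens P ↔ ∃ p ∈ P, ¬ p = "" ∧ PySem.Str.len p = L := by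
  unfold lens
  rw [PySem.List.mem_sorted]
  rw [PySem.Set.mem_ofList]
  simp only [List.mem_map, List.mem_filter]
  constructor
  · rintro ⟨p, ⟨hp, hne⟩, hlen⟩
    exact ⟨p, hp, by simpa using hne, hlen⟩
  · rintro ⟨p, hp, hne, hlen⟩
    exact ⟨p, ⟨hp, by simpa using hne⟩, hlen⟩

theorem lens_pairwise (P : List String) : (lens P).Pairwise (fun a b => b ≤ a) :=
  PySem.List.sorted_pairwise_rev _ _

theorem altFind_eq_find? (T : PySem.Dict String String) (rest : String) (ls : List Int) :
    altFind T rest ls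
    = (ls.find? (fun L => decide (L ≤ PySem.Str.len rest)
        && T.contains (PySem.Str.slice rest none (some L)))).map
        (fun L => (T.getD (PySem.Str.slice rest none (some L)) "", L)) := by
  induction ls with
  | nil => rfl
  | cons L ls ih =>
    simp only [altFind, List.find?_cons]
    by_cases h : L ≤ PySem.Str.len rest ∧ T.contains (PySem.Str.slice rest none (some L)) = true
    · have hb : (decide (L ≤ PySem.Str.len rest) && T.contains (PySem.Str.slice rest none (some L))) = true := by
        rw [decide_eq_true h.1, h.2]; rfl
      rw [if_pos h, hb]
      rfl
    · have hb : (decide (L ≤ PySem.Str.len rest) && T.contains (PySem.Str.slice rest none (some L))) = false := by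
        rcases not_and_or.mp h with h1 | h1
        · rw [decide_eq_false h1]; rfl
        · rw [Bool.eq_false_iff.mpr h1, Bool.and_false]
      rw [if_neg h, hb]
      exact ih


theorem slice_take (s : String) (L : Int) (h : 0 ≤ L) :
    (PySem.Str.slice s none (some L)).toList = s.toList.take L.toNat := by
  simp [PySem.Str.toList_slice, PySem.Chars.slice_eq_listSlice, PySem.List.slice_to _ h]

theorem startswith_iff' (s p : String) : PySem.Str.startswith s p = true ↔ p.toList <+: s.toList := by
  rw [PySem.Str.startswith_eq]; exact PySem.Chars.startswith_iff _ _

theorem len_pos_iff (p : String) : 0 < PySem.Str.len p ↔ ¬ p = "" := by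
  rw [PySem.Str.len_eq]
  constructor
  · intro h hc; subst hc; simp at h
  · intro h
    have h1 : p.toList ≠ [] := by simpa [String.toList_eq_nil_iff] using h
    have h2 := List.length_pos_iff.mpr h1
    omega

theorem key_iff (lw p : String) (L : Int) (hL : 1 ≤ L) (hlen : L ≤ PySem.Str.len lw) :
    PySem.Str.lower p = PySem.Str.slice lw none (some L)
      ↔ (goodb lw p = true ∧ PySem.Str.len p = L) := by
  constructor
  · intro hpe
    have hto : PySem.Chars.lower p.toList = lw.toList.take L.toNat := by
      rw [← PySem.Str.toList_lower, hpe, slice_take _ _ (by omega)]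
    have hplen : p.toList.length = L.toNat := by
      have h1 : (PySem.Chars.lower p.toList).length = p.toList.length := by simp [PySem.Chars.lower]
      rw [hto] at h1
      rw [PySem.Str.len_eq] at hlen
      simp only [List.length_take] at h1
      omega
    constructor
    · rw [goodb, startswith_iff', PySem.Str.toList_lower, hto]
      exact List.take_prefix _ _
    · rw [PySem.Str.len_eq, hplen]; omega
  · rintro ⟨hg, hlenp⟩
    have hpre : PySem.Chars.lower p.toList <+: lw.toList := by
      rw [goodb, startswith_iff', PySem.Str.toList_lower] at hg
      exact hg
    have hplen : (PySem.Chars.lower p.toList).length = L.toNat := by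
      rw [PySem.Str.len_eq] at hlenp
      simp only [PySem.Chars.lower, List.length_map]
      omega
    rw [← String.toList_inj, PySem.Str.toList_lower, slice_take _ _ (by omega)]
    rw [List.prefix_iff_eq_take] at hpre
    rw [hplen] at hpre
    exact hpre

theorem goodb_len_le (lw p : String) (hg : goodb lw p = true) :
    PySem.Str.len p ≤ PySem.Str.len lw := by
  rw [goodb, startswith_iff', PySem.Str.toList_lower] at hg
  have h1 := hg.length_le
  have h2 : (PySem.Chars.lower p.toList).length = p.toList.length := by simp [PySem.Chars.lower]
  rw [PySem.Str.len_eq, PySem.Str.len_eq]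
  omega

theorem cond_iff (P : List String) (lw : String) (L : Int) (hL : 1 ≤ L) :
    (decide (L ≤ PySem.Str.len lw) && (tbl P).contains (PySem.Str.slice lw none (some L))) = true
      ↔ ∃ p ∈ P, goodb lw p = true ∧ PySem.Str.len p = L := by
  rw [Bool.and_eq_true, decide_eq_true_iff, PySem.Dict.contains_eq_isSome_get?, tbl_get?,
    List.find?_isSome]
  constructor
  · rintro ⟨hlen, p, hp, hbeq⟩
    have hpe : PySem.Str.lower p = PySem.Str.slice lw none (some L) := by simpa using hbeq
    exact ⟨p, hp, (key_iff lw p L hL hlen).mp hpe⟩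
  · rintro ⟨p, hp, hg, hlenp⟩
    have hlen : L ≤ PySem.Str.len lw := hlenp ▸ goodb_len_le lw p hg
    refine ⟨hlen, p, hp, ?_⟩
    have := (key_iff lw p L hL hlen).mpr ⟨hg, hlenp⟩
    simpa using this

-- ===== the per-step agreement of the two pickers =====
theorem mainStep (P : List String) (w : String) :
    match altFind (tbl P) (PySem.Str.lower w) (lens P) with
    | none => langstePrefix w P = ""
    | some (o, L) => langstePrefix w P = o ∧ PySem.Str.len o = L ∧ 1 ≤ L ∧
        goodb (PySem.Str.lower w) o = true := by
  rw [altFind_eq_find?]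
  cases hf : (lens P).find? (fun L => decide (L ≤ PySem.Str.len (PySem.Str.lower w))
      && (tbl P).contains (PySem.Str.slice (PySem.Str.lower w) none (some L))) with
  | none =>
    simp only [Option.map_none]
    rw [langste_eq_find?]
    have hnone : P.find? (fun p => goodb (PySem.Str.lower w) p
        && decide (0 < PySem.Str.len p)
        && decide (maxLen (PySem.Str.lower w) P ≤ PySem.Str.len p)) = none := by
      rw [List.find?_eq_none]
      intro p hp hcontra
      rw [Bool.and_eq_true, Bool.and_eq_true] at hcontra
      obtain ⟨⟨hg, hpos⟩, -⟩ := hcontra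
      have hpos' : 0 < PySem.Str.len p := of_decide_eq_true hpos
      have hmem : PySem.Str.len p ∈ lens P :=
        (mem_lens P _).mpr ⟨p, hp, (len_pos_iff p).mp hpos', rfl⟩
      have hcond := (cond_iff P (PySem.Str.lower w) (PySem.Str.len p) (by omega)).mpr
        ⟨p, hp, hg, rfl⟩
      exact (List.find?_eq_none.mp hf _ hmem) hcond
    rw [hnone]
    rfl
  | some L =>
    simp only [Option.map_some]
    have hmemL : L ∈ lens P := List.mem_of_find?_eq_some hf
    have hcondL := List.find?_some hf
    have h1L : 1 ≤ L := by
      rcases (mem_lens P L).mp hmemL with ⟨p₀, hp₀, hne₀, hlen₀⟩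
      have := (len_pos_iff p₀).mpr hne₀
      omega
    have hex := (cond_iff P (PySem.Str.lower w) L h1L).mp hcondL
    have hLle : L ≤ maxLen (PySem.Str.lower w) P := by
      rcases hex with ⟨p, hp, hg, hlenp⟩
      have := le_maxLen (PySem.Str.lower w) P p hp hg
      omega
    have hmaxle : maxLen (PySem.Str.lower w) P ≤ L := by
      by_cases h0 : maxLen (PySem.Str.lower w) P ≤ 0
      · omega
      · push_neg at h0
        rcases maxLen_attain (PySem.Str.lower w) P h0 with ⟨q, hq, hgq, hlq⟩
        have hqne : ¬ q = "" := (len_pos_iff q).mp (by omega)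
        have hmemM : maxLen (PySem.Str.lower w) P ∈ lens P :=
          (mem_lens P _).mpr ⟨q, hq, hqne, hlq⟩
        have hcondM := (cond_iff P (PySem.Str.lower w) _ (by omega)).mpr ⟨q, hq, hgq, hlq⟩
        exact pvFind?_max _ _ L (lens_pairwise P) hf _ hmemM hcondM
    have hLM : L = maxLen (PySem.Str.lower w) P := le_antisymm hLle hmaxle
    have hlenlw : L ≤ PySem.Str.len (PySem.Str.lower w) := by
      rw [Bool.and_eq_true, decide_eq_true_iff] at hcondL
      exact hcondL.1
    have hgetD : (tbl P).getD (PySem.Str.slice (PySem.Str.lower w) none (some L)) ""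
        = (P.find? (fun p => PySem.Str.lower p
            == PySem.Str.slice (PySem.Str.lower w) none (some L))).getD "" := by
      simp [PySem.Dict.getD, tbl_get?]
    have hcongr : P.find? (fun p => goodb (PySem.Str.lower w) p
          && decide (0 < PySem.Str.len p)
          && decide (maxLen (PySem.Str.lower w) P ≤ PySem.Str.len p))
        = P.find? (fun p => PySem.Str.lower p
            == PySem.Str.slice (PySem.Str.lower w) none (some L)) := by
      apply pvFind?_congr
      intro p hp
      by_cases hpe : PySem.Str.lower p = PySem.Str.slice (PySem.Str.lower w) none (some L)
      · rcases (key_iff _ p L h1L hlenlw).mp hpe with ⟨hg, hlenp⟩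
        rw [hg, decide_eq_true (by omega : 0 < PySem.Str.len p),
          decide_eq_true (by omega : maxLen (PySem.Str.lower w) P ≤ PySem.Str.len p)]
        simp [hpe]
      · have hrhs : (PySem.Str.lower p
            == PySem.Str.slice (PySem.Str.lower w) none (some L)) = false := by
          simp [hpe]
        rw [hrhs]
        by_cases hg : goodb (PySem.Str.lower w) p = true
        · by_cases hMp : maxLen (PySem.Str.lower w) P ≤ PySem.Str.len p
          · have hle := le_maxLen (PySem.Str.lower w) P p hp hg
            have hlenp : PySem.Str.len p = L := by omega
            exact absurd ((key_iff _ p L h1L hlenlw).mpr ⟨hg, hlenp⟩) hpe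
          · rw [decide_eq_false hMp]; simp
        · rw [Bool.eq_false_iff.mpr hg]; simp
    rcases hex with ⟨p₁, hp₁, hg₁, hlen₁⟩
    have hbeq₁ : (PySem.Str.lower p₁
        == PySem.Str.slice (PySem.Str.lower w) none (some L)) = true := by
      simp [(key_iff _ p₁ L h1L hlenlw).mpr ⟨hg₁, hlen₁⟩]
    have hsome : (P.find? (fun p => PySem.Str.lower p
        == PySem.Str.slice (PySem.Str.lower w) none (some L))).isSome := by
      rw [List.find?_isSome]; exact ⟨p₁, hp₁, hbeq₁⟩
    rcases Option.isSome_iff_exists.mp hsome with ⟨v, hv⟩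
    have hvmem : v ∈ P := List.mem_of_find?_eq_some hv
    have hvbeq := List.find?_some hv
    have hvpe : PySem.Str.lower v = PySem.Str.slice (PySem.Str.lower w) none (some L) := by
      simpa using hvbeq
    rcases (key_iff _ v L h1L hlenlw).mp hvpe with ⟨hgv, hlenv⟩
    refine ⟨?_, ?_, h1L, ?_⟩
    · rw [langste_eq_find?, hcongr, hgetD, hv]
    · rw [hgetD, hv]; exact hlenv
    · rw [hgetD, hv]; exact hgv

-- ===== string utilities =====
theorem join_chars_append (sep : List Char) : ∀ (l : List (List Char)) (x : List Char), l ≠ [] →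
    PySem.Chars.join sep (l ++ [x]) = PySem.Chars.join sep l ++ sep ++ x := by
  intro l
  induction l with
  | nil => intro x h; exact absurd rfl h
  | cons a l ih =>
    intro x _
    cases l with
    | nil =>
      simp [PySem.Chars.join_cons_cons, PySem.Chars.join_singleton]
    | cons b l =>
      have h1 := ih x (by simp)
      simp only [List.cons_append, PySem.Chars.join_cons_cons] at h1 ⊢
      rw [h1]
      simp [List.append_assoc]

theorem join_singleton' (x : String) : PySem.Str.join "-" [x] = x := by
  rw [← String.toList_inj]
  simp [PySem.Chars.join_singleton]

theorem join_append' (parts : List String) (x : String) (h : parts ≠ []) :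
    PySem.Str.join "-" (parts ++ [x]) = PySem.Str.join "-" parts ++ "-" ++ x := by
  rw [← String.toList_inj]
  simp only [PySem.Str.toList_join, String.toList_append, List.map_append, List.map_cons, List.map_nil]
  rw [join_chars_append _ _ _ (by simpa using h)]

theorem lower_eq_empty_iff (s : String) : PySem.Str.lower s = "" ↔ s = "" := by
  rw [← String.toList_inj, ← String.toList_inj (s₁ := s) (s₂ := "")]
  simp [PySem.Chars.lower]

theorem lower_slice_comm (w : String) (L : Int) :
    PySem.Str.slice (PySem.Str.lower w) (some L) none
      = PySem.Str.lower (PySem.Str.slice w (some L) none) := by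
  rw [← String.toList_inj]
  simp only [PySem.Str.toList_slice, PySem.Str.toList_lower, PySem.Chars.slice_eq_listSlice,
    PySem.List.slice_some_none]
  have hlen : (PySem.Chars.lower w.toList).length = w.toList.length := by simp [PySem.Chars.lower]
  rw [hlen]
  simp [PySem.Chars.lower, List.map_drop]

-- ===== the loop agreement =====
theorem loopEq (P : List String) : ∀ (n : Nat) (w : String), w.toList.length ≤ n →
    ∀ (fuel : Nat) (parts : List String), w.toList.length < fuel → parts ≠ [] →
    chemischLoop P w (PySem.Str.join "-" parts)
      = altLoop (tbl P) (lens P) fuel (PySem.Str.lower w) parts := by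
  intro n
  induction n with
  | zero =>
    intro w hw fuel parts hfuel hne
    have hw0 : w = "" := by
      rw [← String.toList_inj]
      have : w.toList = [] := List.length_eq_zero_iff.mp (by omega)
      simp [this]
    subst hw0
    obtain ⟨f, rfl⟩ : ∃ f, fuel = f + 1 := ⟨fuel - 1, by omega⟩
    rw [chemischLoop]
    have hlow : PySem.Str.lower "" = "" := (lower_eq_empty_iff "").mpr rfl
    rw [hlow]
    simp [altLoop]
  | succ n ih =>
    intro w hw fuel parts hfuel hne
    obtain ⟨f, rfl⟩ : ∃ f, fuel = f + 1 := ⟨fuel - 1, by omega⟩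
    by_cases hwe : w = ""
    · subst hwe
      rw [chemischLoop]
      have hlow : PySem.Str.lower "" = "" := (lower_eq_empty_iff "").mpr rfl
      rw [hlow]
      simp [altLoop]
    · have hlwe : ¬ PySem.Str.lower w = "" := fun h => hwe ((lower_eq_empty_iff w).mp h)
      have hms := mainStep P w
      rw [chemischLoop, if_neg hwe]
      cases haf : altFind (tbl P) (PySem.Str.lower w) (lens P) with
      | none =>
        rw [haf] at hms
        simp only [altLoop, if_neg hlwe, haf, hms]
        simp
      | some oL =>
        obtain ⟨o, L⟩ := oL
        rw [haf] at hms
        obtain ⟨ho, hlo, h1L, hgo⟩ := hms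
        have hone : ¬ o = "" := (len_pos_iff o).mp (by omega)
        have hwlen : 1 ≤ w.toList.length := by
          have : w.toList ≠ [] := by simpa [String.toList_eq_nil_iff] using hwe
          have := List.length_pos_iff.mpr this
          omega
        have hdlen : (PySem.Str.slice w (some L) none).toList.length < w.toList.length := by
          simp only [PySem.Str.toList_slice, PySem.Chars.slice_eq_listSlice]
          rw [PySem.List.slice_from _ (by omega)]
          simp only [List.length_drop]
          omega
        simp only [altLoop, if_neg hlwe, haf, ho]
        rw [dif_neg hone]
        rw [hlo]
        have hacc : PySem.Str.join "-" parts ++ "-" ++ o = PySem.Str.join "-" (parts ++ [o]) :=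
          (join_append' parts o hne).symm
        rw [hacc, lower_slice_comm]
        exact ih (PySem.Str.slice w (some L) none) (by omega) f (parts ++ [o])
          (by omega) (by simp)

-- ===== VERDICT (by name: the statement is the Claim_ definition above) =====
theorem chemischWoord_spec : Claim_equal_chemischWoord := by
  intro w P _
  unfold Spec_chemischWoord
  have halt : chemischWoord_alt w P
      = altLoop (tbl P) (lens P) (w.toList.length + 1) (PySem.Str.lower w) [] := rfl
  rw [halt]
  have hms := mainStep P w
  by_cases hwe : w = ""
  · subst hwe
    have hlow : PySem.Str.lower "" = "" := (lower_eq_empty_iff "").mpr rfl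
    cases haf : altFind (tbl P) (PySem.Str.lower "") (lens P) with
    | none =>
      rw [haf] at hms
      rw [chemischWoord]
      simp only [hms]
      rw [hlow]
      simp only [altLoop]
      rw [← String.toList_inj]
      simp [PySem.Chars.join_nil]
    | some oL =>
      obtain ⟨o, L⟩ := oL
      rw [haf] at hms
      obtain ⟨ho, hlo, h1L, hgo⟩ := hms
      have hle := goodb_len_le _ o hgo
      rw [hlow] at hle
      have : PySem.Str.len "" = 0 := by simp [PySem.Str.len_eq]
      omega
  · have hlwe : ¬ PySem.Str.lower w = "" := fun h => hwe ((lower_eq_empty_iff w).mp h)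
    cases haf : altFind (tbl P) (PySem.Str.lower w) (lens P) with
    | none =>
      rw [haf] at hms
      rw [chemischWoord]
      simp only [hms]
      simp only [altLoop, if_neg hlwe, haf]
      simp
    | some oL =>
      obtain ⟨o, L⟩ := oL
      rw [haf] at hms
      obtain ⟨ho, hlo, h1L, hgo⟩ := hms
      have hone : ¬ o = "" := (len_pos_iff o).mp (by omega)
      have hwlen : 1 ≤ w.toList.length := by
        have h1 : w.toList ≠ [] := by simpa [String.toList_eq_nil_iff] using hwe
        have := List.length_pos_iff.mpr h1
        omega
      have hdlen : (PySem.Str.slice w (some L) none).toList.length < w.toList.length := by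
        simp only [PySem.Str.toList_slice, PySem.Chars.slice_eq_listSlice]
        rw [PySem.List.slice_from _ (by omega)]
        simp only [List.length_drop]
        omega
      rw [chemischWoord]
      simp only [ho, if_neg hone]
      simp only [altLoop, if_neg hlwe, haf]
      rw [hlo, lower_slice_comm]
      have := loopEq P ((PySem.Str.slice w (some L) none).toList.length)
        (PySem.Str.slice w (some L) none) le_rfl w.toList.length [o] (by omega) (by simp)
      rw [join_singleton'] at this
      exact this
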